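-- pv_equiv track=rewrite | github.com/Wiecheversplash/AED1-FCEN | Guias/Guia 8/Guia 8.py | borrarPosParesin
-- ===== SOURCE A (Python) =====
-- def borrarPosParesin(a:list)->list:
--     b:list = []
--     for i in range(0,len(a)):
--         if i%2==0:
--             b.append(0)
--         else:
--             b.append(a[i])
--     return b
-- ===== SOURCE B (Python) =====
-- def borrarPosParesin(a: list) -> list:
--     b = list(a)
--     b[::2] = [0] * len(b[::2])
--     return b
-- ===== Notes on version B (the rewrite author's own statement) =====
-- stated objective: faster
-- what changed: Replaces the per-index Python loop with parity branch by a bulk copy followed by one strided slice assignment that zeroes all even positions at once, moving the per-element work into C-level list operations.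
import Mathlib
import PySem

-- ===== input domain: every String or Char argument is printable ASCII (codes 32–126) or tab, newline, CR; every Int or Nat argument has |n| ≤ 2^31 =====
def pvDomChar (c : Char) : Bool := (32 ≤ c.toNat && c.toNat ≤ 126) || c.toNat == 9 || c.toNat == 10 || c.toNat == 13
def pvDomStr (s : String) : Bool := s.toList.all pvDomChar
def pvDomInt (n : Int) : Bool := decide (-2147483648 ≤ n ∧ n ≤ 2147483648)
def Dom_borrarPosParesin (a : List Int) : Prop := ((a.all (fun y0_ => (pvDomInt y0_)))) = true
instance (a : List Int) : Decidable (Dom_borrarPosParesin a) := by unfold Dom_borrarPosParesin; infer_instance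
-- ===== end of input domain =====

-- B replaces A's per-index loop-and-branch by a bulk copy plus one stride-2 overwrite of the even positions (idiomatic slice assignment in Python).


-- ===== PORT A =====
-- for i in range(0, len(a)): if i%2==0: b.append(0) else: b.append(a[i])
-- a[i] is always in range here, so pyGetD with default 0 is exact.
def borrarPosParesin (a : List Int) : List Int :=
  (PySem.List.pyRange 0 a.length 1).foldl
    (fun b i => if PySem.Int.mod i 2 == 0 then b ++ [0] else b ++ [PySem.List.pyGetD a i 0]) []

-- ===== PORT B =====
-- b = list(a); b[::2] = [0]*len(b[::2]): walk the copy overwriting every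
-- second element (stride 2) with 0, keeping the element in between.
def pvZeroStride2 : List Int → List Int
  | [] => []
  | [_] => [0]
  | _ :: y :: rest => 0 :: y :: pvZeroStride2 rest

def borrarPosParesin_alt (a : List Int) : List Int := pvZeroStride2 a

-- ===== PRECONDITION & SPEC =====
def Spec_borrarPosParesin (a : List Int) (out : List Int) : Prop := out = borrarPosParesin_alt a
instance (a : List Int) (out : List Int) : Decidable (Spec_borrarPosParesin a out) := by unfold Spec_borrarPosParesin; infer_instance

-- ===== CLAIM (what is proved, stated in full; the proofs are below) =====
def Claim_equal_borrarPosParesin : Prop := ∀ (a : List Int), Dom_borrarPosParesin a → Spec_borrarPosParesin a (borrarPosParesin a)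

-- ===== LEMMAS AND PROOFS =====
theorem pvZeroStride2_length (a : List Int) : (pvZeroStride2 a).length = a.length := by
  induction a using pvZeroStride2.induct <;> simp [pvZeroStride2, *]

theorem pvZeroStride2_getElem (a : List Int) (k : Nat) (hk : k < a.length) :
    (pvZeroStride2 a)[k]'(by rw [pvZeroStride2_length]; exact hk) =
      if k % 2 = 0 then 0 else a[k] := by
  induction a using pvZeroStride2.induct generalizing k with
  | case1 => simp at hk
  | case2 x =>
    have : k = 0 := by simp at hk; omega
    subst this; simp [pvZeroStride2]
  | case3 x y rest ih =>
    match k with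
    | 0 => simp [pvZeroStride2]
    | 1 => simp [pvZeroStride2]
    | (k+2) =>
      have hk' : k < rest.length := by simpa using hk
      have := ih k hk'
      simp only [pvZeroStride2, List.getElem_cons_succ]
      rw [this]
      have : (k + 2) % 2 = k % 2 := by omega
      rw [this]

theorem portA_eq_map (a : List Int) :
    borrarPosParesin a = (PySem.List.pyRange 0 a.length 1).map
      (fun i => if PySem.Int.mod i 2 == 0 then 0 else PySem.List.pyGetD a i 0) := by
  unfold borrarPosParesin
  rw [show (fun (b : List Int) (i : Int) =>
        if PySem.Int.mod i 2 == 0 then b ++ [0] else b ++ [PySem.List.pyGetD a i 0]) =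
      (fun b i => b ++ [if PySem.Int.mod i 2 == 0 then 0 else PySem.List.pyGetD a i 0]) from by
        funext b i; split <;> rfl]
  rw [PySem.List.foldl_append_singleton_eq_map]
  rfl

-- ===== VERDICT (by name: the statement is the Claim_ definition above) =====
theorem borrarPosParesin_spec : Claim_equal_borrarPosParesin := by
  intro a _
  show borrarPosParesin a = borrarPosParesin_alt a
  apply List.ext_getElem?
  intro k
  by_cases hk : k < a.length
  · rw [portA_eq_map]
    rw [PySem.List.getElem?_map_pyRange_zero _ a.length k hk]
    have hB : (borrarPosParesin_alt a)[k]? = some (if k % 2 = 0 then 0 else a[k]) := by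
      rw [List.getElem?_eq_getElem (by simp [borrarPosParesin_alt, pvZeroStride2_length, hk])]
      exact congrArg some (pvZeroStride2_getElem a k hk)
    rw [hB]
    congr 1
    rw [PySem.Int.mod_eq_emod_of_pos (by norm_num)]
    by_cases hp : k % 2 = 0
    · have : ((k : Int) % 2 == 0) = true := by
        simp; omega
      simp [this, hp]
    · have : ((k : Int) % 2 == 0) = false := by
        simp; omega
      simp [this, hp]
      rw [List.getElem?_eq_getElem hk]; rfl
  · rw [List.getElem?_eq_none, List.getElem?_eq_none]
    · simp [borrarPosParesin_alt, pvZeroStride2_length]; omega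
    · rw [portA_eq_map]; simp [PySem.List.length_pyRange_one]; omega
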